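-- pv_equiv track=rewrite | github.com/AIT-LKR/SEROS | pipe3D/postprocessing/analysis.py | find_minimum_line
-- ===== SOURCE A (Python) =====
-- def find_minimum_line(data, column):
--     minimum_line = 0
--     minimum = data[0][column]
--
--     for number,line in enumerate(data):
--         current_value = line[column]
--         if current_value <= minimum:
--             minimum = current_value
--             minimum_line = number
--
--     return minimum_line
-- ===== SOURCE B (Python) =====
-- def find_minimum_line(data, column):
--     vals = [line[column] for line in data]
--     return len(vals) - 1 - vals[::-1].index(min(vals))
-- ===== Notes on version B (the rewrite author's own statement) =====
-- stated objective: idiomatic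
-- what changed: replaces the running-minimum scan that tracks a last-best index with a loop-free formulation: extract the column, take builtin min, and locate the last occurrence as len-1-reversed.index(min)
import Mathlib
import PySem

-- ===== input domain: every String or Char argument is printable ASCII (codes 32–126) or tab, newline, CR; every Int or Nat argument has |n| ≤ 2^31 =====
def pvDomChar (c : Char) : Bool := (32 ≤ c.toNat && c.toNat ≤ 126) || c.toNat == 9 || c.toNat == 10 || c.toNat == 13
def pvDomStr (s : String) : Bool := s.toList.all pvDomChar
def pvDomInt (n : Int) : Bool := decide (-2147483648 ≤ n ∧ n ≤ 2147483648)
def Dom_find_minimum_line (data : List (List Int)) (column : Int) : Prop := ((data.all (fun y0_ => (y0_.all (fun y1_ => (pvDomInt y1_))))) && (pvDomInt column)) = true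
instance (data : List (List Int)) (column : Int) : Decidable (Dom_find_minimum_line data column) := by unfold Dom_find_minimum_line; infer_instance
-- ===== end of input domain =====

-- B replaces A's running-minimum scan (tracking a last-best index) with the loop-free
-- len-1-reversed.index(min(column)) formulation; return values are proved equal on Pre_.

-- ===== PORT A =====
-- the 'for number,line in enumerate(data)' loop of A, state = (number, minimum, minimum_line)
def fmLoopA (data : List (List Int)) (column : Int) (i minimum best : Int) : Int :=
  match data with
  | [] => best
  | line :: rest =>
    -- current_value = line[column]
    if (PySem.List.pyGet? line column).getD 0 ≤ minimum then
      fmLoopA rest column (i + 1) ((PySem.List.pyGet? line column).getD 0) i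
    else fmLoopA rest column (i + 1) minimum best

def find_minimum_line (data : List (List Int)) (column : Int) : Int :=
  -- minimum = data[0][column]  (getD defaults are unreachable under Pre_)
  let minimum := (PySem.List.pyGet? ((PySem.List.pyGet? data 0).getD []) column).getD 0
  fmLoopA data column 0 minimum 0

-- ===== PORT B =====
def find_minimum_line_alt (data : List (List Int)) (column : Int) : Int :=
  -- vals = [line[column] for line in data]
  let vals := data.map fun line => (PySem.List.pyGet? line column).getD 0
  -- len(vals) - 1 - vals[::-1].index(min(vals))
  (vals.length : Int) - 1 -
    ((PySem.List.index? ((PySem.List.slice? vals none none (-1)).getD [])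
        ((PySem.List.min? vals (fun x => x)).getD 0)).getD 0 : Nat)

-- ===== PRECONDITION & SPEC =====
-- Pre_ excludes exactly the inputs where Python A raises: empty data (IndexError on data[0])
-- and rows where 'column' is an invalid Python index (IndexError on line[column]).
def Pre_find_minimum_line (data : List (List Int)) (column : Int) : Prop :=
  data ≠ [] ∧ ∀ line ∈ data, PySem.Raise.InRange line.length column
instance (data : List (List Int)) (column : Int) : Decidable (Pre_find_minimum_line data column) := by
  unfold Pre_find_minimum_line; infer_instance

def pvWitness_find_minimum_line : List (List Int) × Int := ([[3, 1], [2, 1]], 1)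

def Spec_find_minimum_line (data : List (List Int)) (column : Int) (out : Int) : Prop := out = find_minimum_line_alt data column
instance (data : List (List Int)) (column : Int) (out : Int) : Decidable (Spec_find_minimum_line data column out) := by unfold Spec_find_minimum_line; infer_instance

-- ===== CLAIM (what is proved, stated in full; the proofs are below) =====
def Claim_equal_find_minimum_line : Prop := ∀ (data : List (List Int)) (column : Int), Dom_find_minimum_line data column → Pre_find_minimum_line data column → Spec_find_minimum_line data column (find_minimum_line data column)

-- ===== LEMMAS AND PROOFS =====

-- proof-only bridge: a last-match scan, intermediate between A's loop and B's formula
def fmLoopB (data : List (List Int)) (column : Int) (i m best : Int) : Int :=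
  match data with
  | [] => best
  | line :: rest =>
    if (PySem.List.pyGet? line column).getD 0 = m then fmLoopB rest column (i + 1) m i
    else fmLoopB rest column (i + 1) m best

-- min-fold facts
theorem fm_foldl_min_le (l : List Int) (m : Int) : l.foldl min m ≤ m := by
  induction l generalizing m with
  | nil => simp
  | cons x t ih => exact le_trans (ih (min m x)) (min_le_left _ _)

theorem fm_foldl_min_mem (l : List Int) (m : Int) : l.foldl min m = m ∨ l.foldl min m ∈ l := by
  induction l generalizing m with
  | nil => simp
  | cons x t ih =>
    have hstep : List.foldl min m (x :: t) = List.foldl min (min m x) t := by simp [List.foldl]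
    rcases ih (min m x) with h | h
    · rcases min_cases m x with ⟨he, _⟩ | ⟨he, _⟩
      · left; rw [hstep, h, he]
      · right; rw [hstep, h, he]; simp
    · right; rw [hstep]; exact List.mem_cons_of_mem _ h

-- branch equations
theorem fmLoopA_cons_le {line : List Int} {column m : Int} (rest : List (List Int)) (i b : Int)
    (h : (PySem.List.pyGet? line column).getD 0 ≤ m) :
    fmLoopA (line :: rest) column i m b =
      fmLoopA rest column (i + 1) ((PySem.List.pyGet? line column).getD 0) i := by
  simp [fmLoopA, h]

theorem fmLoopA_cons_gt {line : List Int} {column m : Int} (rest : List (List Int)) (i b : Int)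
    (h : ¬ (PySem.List.pyGet? line column).getD 0 ≤ m) :
    fmLoopA (line :: rest) column i m b = fmLoopA rest column (i + 1) m b := by
  simp [fmLoopA, h]

theorem fmLoopB_cons_eq {line : List Int} {column m : Int} (rest : List (List Int)) (i b : Int)
    (h : (PySem.List.pyGet? line column).getD 0 = m) :
    fmLoopB (line :: rest) column i m b = fmLoopB rest column (i + 1) m i := by
  simp [fmLoopB, h]

theorem fmLoopB_cons_ne {line : List Int} {column m : Int} (rest : List (List Int)) (i b : Int)
    (h : ¬ (PySem.List.pyGet? line column).getD 0 = m) :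
    fmLoopB (line :: rest) column i m b = fmLoopB rest column (i + 1) m b := by
  simp [fmLoopB, h]

-- if the minimum value occurs in the remaining rows, fmLoopB's result does not depend on best
theorem fmLoopB_indep (data : List (List Int)) (column : Int) :
    ∀ (i b b' m : Int),
      m ∈ data.map (fun line => (PySem.List.pyGet? line column).getD 0) →
      fmLoopB data column i m b = fmLoopB data column i m b' := by
  induction data with
  | nil => intro i b b' m h; simp at h
  | cons line rest ih =>
    intro i b b' m h
    by_cases hx : (PySem.List.pyGet? line column).getD 0 = m
    · rw [fmLoopB_cons_eq rest i b hx, fmLoopB_cons_eq rest i b' hx]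
    · have hm : m ∈ rest.map (fun line => (PySem.List.pyGet? line column).getD 0) := by
        rcases List.mem_map.mp h with ⟨l, hl, hv⟩
        rcases List.mem_cons.mp hl with rfl | hl'
        · exact absurd hv hx
        · exact List.mem_map.mpr ⟨l, hl', hv⟩
      rw [fmLoopB_cons_ne rest i b hx, fmLoopB_cons_ne rest i b' hx, ih _ _ _ _ hm]

-- if m never occurs, fmLoopB returns its accumulator
theorem fmLoopB_not_mem (data : List (List Int)) (column : Int) :
    ∀ (i b m : Int),
      m ∉ data.map (fun line => (PySem.List.pyGet? line column).getD 0) →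
      fmLoopB data column i m b = b := by
  induction data with
  | nil => intro i b m _; simp [fmLoopB]
  | cons line rest ih =>
    intro i b m h
    have hx : ¬ (PySem.List.pyGet? line column).getD 0 = m := fun he => h (by simp [he])
    have hr : m ∉ rest.map (fun line => (PySem.List.pyGet? line column).getD 0) := by
      intro hm; exact h (List.mem_cons_of_mem _ hm)
    rw [fmLoopB_cons_ne rest i b hx, ih _ _ _ hr]

-- loop correspondence: A's running-minimum scan equals the last-match scan at the global minimum
theorem fm_main (data : List (List Int)) (column : Int) :
    ∀ (i m b : Int),
      fmLoopA data column i m b =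
      fmLoopB data column i
        ((data.map (fun line => (PySem.List.pyGet? line column).getD 0)).foldl min m) b := by
  induction data with
  | nil => intro i m b; simp [fmLoopA, fmLoopB]
  | cons line rest ih =>
    intro i m b
    have hfold : ((line :: rest).map (fun l => (PySem.List.pyGet? l column).getD 0)).foldl min m
        = (rest.map (fun l => (PySem.List.pyGet? l column).getD 0)).foldl min
            (min m ((PySem.List.pyGet? line column).getD 0)) := by
      simp
    rw [hfold]
    by_cases hle : (PySem.List.pyGet? line column).getD 0 ≤ m
    · have hminx : min m ((PySem.List.pyGet? line column).getD 0)
          = (PySem.List.pyGet? line column).getD 0 := min_eq_right hle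
      rw [hminx, fmLoopA_cons_le rest i b hle, ih]
      by_cases hxM : (PySem.List.pyGet? line column).getD 0
          = (rest.map (fun l => (PySem.List.pyGet? l column).getD 0)).foldl min
              ((PySem.List.pyGet? line column).getD 0)
      · rw [fmLoopB_cons_eq rest i b hxM]
      · have hmem : (rest.map (fun l => (PySem.List.pyGet? l column).getD 0)).foldl min
              ((PySem.List.pyGet? line column).getD 0)
            ∈ rest.map (fun l => (PySem.List.pyGet? l column).getD 0) := by
          rcases fm_foldl_min_mem (rest.map (fun l => (PySem.List.pyGet? l column).getD 0))
              ((PySem.List.pyGet? line column).getD 0) with h | h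
          · exact absurd h.symm hxM
          · exact h
        rw [fmLoopB_cons_ne rest i b hxM]
        exact fmLoopB_indep rest column (i + 1) i b _ hmem
    · have hminm : min m ((PySem.List.pyGet? line column).getD 0) = m :=
        min_eq_left (le_of_lt (lt_of_not_ge hle))
      rw [hminm, fmLoopA_cons_gt rest i b hle, ih]
      have hxM : ¬ ((PySem.List.pyGet? line column).getD 0
          = (rest.map (fun l => (PySem.List.pyGet? l column).getD 0)).foldl min m) := by
        intro he
        exact hle (he ▸ fm_foldl_min_le _ _)
      rw [fmLoopB_cons_ne rest i b hxM]

-- the last-match scan equals B's reverse-index formula whenever m occurs in the column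
theorem fm_loopB_eq_revIndex (data : List (List Int)) (column : Int) :
    ∀ (i b m : Int),
      m ∈ data.map (fun line => (PySem.List.pyGet? line column).getD 0) →
      fmLoopB data column i m b =
        i + (((data.map (fun line => (PySem.List.pyGet? line column).getD 0)).length : Int) - 1 -
          ((PySem.List.index?
              (data.map (fun line => (PySem.List.pyGet? line column).getD 0)).reverse m).getD 0 : Nat)) := by
  induction data with
  | nil => intro i b m h; simp at h
  | cons line rest ih =>
    intro i b m h
    by_cases hr : m ∈ rest.map (fun line => (PySem.List.pyGet? line column).getD 0)
    · -- last occurrence lies in rest: index into the reverse hits the rest part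
      have hrev : m ∈ (rest.map (fun line => (PySem.List.pyGet? line column).getD 0)).reverse := by
        simpa using hr
      have hidx : PySem.List.index?
            ((line :: rest).map (fun line => (PySem.List.pyGet? line column).getD 0)).reverse m
          = PySem.List.index?
            (rest.map (fun line => (PySem.List.pyGet? line column).getD 0)).reverse m := by
        simp only [List.map_cons, List.reverse_cons]
        exact PySem.List.index?_append_of_mem _ hrev
      have hlt : ((PySem.List.index?
            (rest.map (fun line => (PySem.List.pyGet? line column).getD 0)).reverse m).getD 0 : Nat)
          < (rest.map (fun line => (PySem.List.pyGet? line column).getD 0)).length := by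
        have hs : (PySem.List.index?
              (rest.map (fun line => (PySem.List.pyGet? line column).getD 0)).reverse m).isSome :=
          (PySem.List.index?_isSome_iff _ _).mpr hrev
        rcases Option.isSome_iff_exists.mp hs with ⟨k, hk⟩
        rcases PySem.List.getElem_of_index?_eq_some hk with ⟨hklt, _, _⟩
        rw [hk]
        simpa using hklt
      have hstep : fmLoopB (line :: rest) column i m b = fmLoopB rest column (i + 1) m b := by
        by_cases hx : (PySem.List.pyGet? line column).getD 0 = m
        · rw [fmLoopB_cons_eq rest i b hx]
          exact fmLoopB_indep rest column (i + 1) i b m hr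
        · exact fmLoopB_cons_ne rest i b hx
      rw [hstep, ih (i + 1) b m hr, hidx]
      simp only [List.map_cons, List.length_cons]
      push_cast
      omega
    · -- m does not occur later: this line carries the last occurrence
      have hx : (PySem.List.pyGet? line column).getD 0 = m := by
        rcases List.mem_map.mp h with ⟨l, hl, hv⟩
        rcases List.mem_cons.mp hl with rfl | hl'
        · exact hv
        · exact absurd (List.mem_map.mpr ⟨l, hl', hv⟩) hr
      have hnrev : m ∉ (rest.map (fun line => (PySem.List.pyGet? line column).getD 0)).reverse := by
        simpa using hr
      have hidx : PySem.List.index?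
            ((line :: rest).map (fun line => (PySem.List.pyGet? line column).getD 0)).reverse m
          = some (rest.map (fun line => (PySem.List.pyGet? line column).getD 0)).reverse.length := by
        simp only [List.map_cons, List.reverse_cons, hx]
        exact PySem.List.index?_append_singleton_self _ _ hnrev
      rw [fmLoopB_cons_eq rest i b hx, fmLoopB_not_mem rest column (i + 1) i m hr, hidx]
      simp only [List.map_cons, List.length_cons, List.length_reverse, Option.getD_some]
      push_cast
      omega

-- ===== VERDICT (by name: the statement is the Claim_ definition above) =====
theorem find_minimum_line_spec : Claim_equal_find_minimum_line := by
  intro data column _ hpre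
  unfold Pre_find_minimum_line at hpre
  unfold Spec_find_minimum_line find_minimum_line find_minimum_line_alt
  cases data with
  | nil => exact absurd rfl hpre.1
  | cons line rest =>
    rw [show PySem.List.pyGet? (line :: rest) 0 = some line from PySem.List.pyGet?_zero_cons _ _]
    simp only [Option.getD_some]
    rw [fm_main]
    rw [PySem.List.slice?_none_none_neg_one]
    simp only [Option.getD_some, List.map_cons, PySem.List.min?_id_cons]
    have hfold : List.foldl min ((PySem.List.pyGet? line column).getD 0)
          (((PySem.List.pyGet? line column).getD 0) ::
            rest.map (fun l => (PySem.List.pyGet? l column).getD 0))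
        = List.foldl min ((PySem.List.pyGet? line column).getD 0)
            (rest.map (fun l => (PySem.List.pyGet? l column).getD 0)) := by
      simp [List.foldl]
    have hmem : (rest.map (fun l => (PySem.List.pyGet? l column).getD 0)).foldl min
          ((PySem.List.pyGet? line column).getD 0)
        ∈ ((PySem.List.pyGet? line column).getD 0) ::
            rest.map (fun l => (PySem.List.pyGet? l column).getD 0) := by
      rcases fm_foldl_min_mem (rest.map (fun l => (PySem.List.pyGet? l column).getD 0))
          ((PySem.List.pyGet? line column).getD 0) with h | h
      · rw [h]; exact List.mem_cons_self
      · exact List.mem_cons_of_mem _ h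
    have hmem' : (rest.map (fun l => (PySem.List.pyGet? l column).getD 0)).foldl min
          ((PySem.List.pyGet? line column).getD 0)
        ∈ (line :: rest).map (fun l => (PySem.List.pyGet? l column).getD 0) := by
      simpa using hmem
    rw [hfold, fm_loopB_eq_revIndex (line :: rest) column 0 0 _ hmem']
    simp only [List.map_cons, List.length_cons]
    push_cast
    ring
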